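-- pv_equiv track=rewrite | github.com/Nickless-cmd/jarvis-v2 | core/identity/candidate_workflow.py | _insert_block_under_heading
-- ===== SOURCE A (Python) =====
-- def _insert_block_under_heading(text: str, heading: str, content_block: str) -> str:
--     lines = text.splitlines()
--     out: list[str] = []
--     inserted = False
--     index = 0
--     while index < len(lines):
--         line = lines[index]
--         out.append(line)
--         if line.strip() == heading and not inserted:
--             next_index = index + 1
--             while next_index < len(lines) and not lines[next_index].strip():
--                 out.append(lines[next_index])
--                 next_index += 1
--             out.append(content_block)
--             inserted = True
--             index = next_index - 1
--         index += 1
--     if not inserted: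
--         body = text.rstrip()
--         return f"{body}\n\n{heading}\n\n{content_block}\n"
--     return "\n".join(out).rstrip() + "\n"
-- ===== SOURCE B (Python) =====
-- def _insert_block_under_heading(text: str, heading: str, content_block: str) -> str:
--     lines = text.splitlines()
--     stripped = [line.strip() for line in lines]
--     if heading not in stripped:
--         return f"{text.rstrip()}\n\n{heading}\n\n{content_block}\n"
--     i = stripped.index(heading)
--     blanks = next((k for k, s in enumerate(stripped[i + 1:]) if s), len(stripped) - i - 1)
--     cut = i + 1 + blanks
--     return "\n".join(lines[:cut] + [content_block] + lines[cut:]).rstrip() + "\n"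
-- ===== Notes on version B (the rewrite author's own statement) =====
-- stated objective: simpler
-- what changed: A is one imperative while-loop with a mutable inserted flag, an inner blank-copying loop and a pointer rewind (index = next_index - 1); B has no explicit loops at all: it first builds a stripped copy of the lines, uses membership + list.index to locate the heading, counts the leading blank run with a generator fed to next(), and assembles the result once by slicing at the computed cut point.
import Mathlib
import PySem

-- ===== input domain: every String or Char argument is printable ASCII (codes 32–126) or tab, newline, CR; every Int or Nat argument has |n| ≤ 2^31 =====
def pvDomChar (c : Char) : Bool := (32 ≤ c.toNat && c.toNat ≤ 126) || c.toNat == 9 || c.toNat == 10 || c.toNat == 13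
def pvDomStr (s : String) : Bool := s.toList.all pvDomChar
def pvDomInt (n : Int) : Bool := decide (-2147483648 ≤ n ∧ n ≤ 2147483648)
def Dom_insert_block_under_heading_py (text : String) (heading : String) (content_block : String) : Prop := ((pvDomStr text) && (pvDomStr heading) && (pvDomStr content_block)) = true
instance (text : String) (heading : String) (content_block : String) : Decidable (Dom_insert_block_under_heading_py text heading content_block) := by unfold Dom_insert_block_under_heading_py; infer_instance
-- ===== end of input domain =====

-- B replaces A's imperative while-loop (mutable inserted flag, inner blank-copying loop,
-- pointer rewind) by a loop-free staged decomposition: strip pass, index lookup, blank-run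
-- count, one splice; same cost, simpler.

-- ===== PORT A =====
-- inner 'while next_index < len(lines) and not lines[next_index].strip()' loop:
-- returns (out with the blank lines appended, final next_index)
def pvAInner (lines : List String) (out : List String) (ni : Nat) : List String × Nat :=
  if h : ni < lines.length then
    if PySem.Str.strip lines[ni] == "" then
      pvAInner lines (out ++ [lines[ni]]) (ni + 1)
    else (out, ni)
  else (out, ni)
termination_by lines.length - ni

-- the inner loop never moves next_index backwards (needed for pvALoop's termination)
theorem pvAInner_snd_ge (lines : List String) (out : List String) (ni : Nat) :
    ni ≤ (pvAInner lines out ni).2 := by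
  induction hn : lines.length - ni generalizing out ni with
  | zero =>
      rw [pvAInner]
      have h : ¬ ni < lines.length := by omega
      simp [h]
  | succ n ih =>
      rw [pvAInner]
      have h : ni < lines.length := by omega
      by_cases hb : PySem.Str.strip lines[ni] == ""
      · simp only [dif_pos h, if_pos hb]
        have := ih (out ++ [lines[ni]]) (ni + 1) (by omega)
        omega
      · simp [h, hb]

-- outer 'while index < len(lines)' loop; state (out, inserted)
def pvALoop (lines : List String) (heading cb : String) (out : List String)
    (inserted : Bool) (index : Nat) : List String × Bool :=
  if h : index < lines.length then
    let line := lines[index]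
    let out1 := out ++ [line]
    if PySem.Str.strip line == heading && !inserted then
      let r := pvAInner lines out1 (index + 1)
      pvALoop lines heading cb (r.1 ++ [cb]) true ((r.2 - 1) + 1)
    else
      pvALoop lines heading cb out1 inserted (index + 1)
  else (out, inserted)
termination_by lines.length - index
decreasing_by
  · have := pvAInner_snd_ge lines (out ++ [lines[index]]) (index + 1); omega
  · omega

def insert_block_under_heading_py (text : String) (heading : String) (content_block : String) : String :=
  let lines := PySem.Str.splitlines text
  let r := pvALoop lines heading content_block [] false 0
  if !r.2 then
    PySem.Str.rstrip text ++ "\n\n" ++ heading ++ "\n\n" ++ content_block ++ "\n"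
  else
    PySem.Str.rstrip (PySem.Str.join "\n" r.1) ++ "\n"

-- ===== PORT B =====
def insert_block_under_heading_py_alt (text : String) (heading : String) (content_block : String) : String :=
  let lines := PySem.Str.splitlines text
  -- stripped = [line.strip() for line in lines]
  let stripped := lines.map PySem.Str.strip
  -- 'if heading not in stripped: return fallback' followed by 'stripped.index(heading)'
  -- ported together as one match on index? (index? = none ↔ heading ∉ stripped; exact)
  match PySem.List.index? stripped heading with
  | none => PySem.Str.rstrip text ++ "\n\n" ++ heading ++ "\n\n" ++ content_block ++ "\n"
  | some i =>
    -- next((k for k, s in enumerate(stripped[i+1:]) if s), len(stripped)-i-1)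
    -- = length of the leading run of "" in stripped[i+1:] (exact, incl. the default case)
    let blanks := ((stripped.drop (i + 1)).takeWhile (fun s => s == "")).length
    let cut := i + 1 + blanks
    -- "\n".join(lines[:cut] + [content_block] + lines[cut:]).rstrip() + "\n"
    PySem.Str.rstrip (PySem.Str.join "\n" (lines.take cut ++ [content_block] ++ lines.drop cut)) ++ "\n"

-- ===== PRECONDITION & SPEC =====
def Spec_insert_block_under_heading_py (text : String) (heading : String) (content_block : String) (out : String) : Prop := out = insert_block_under_heading_py_alt text heading content_block
instance (text : String) (heading : String) (content_block : String) (out : String) : Decidable (Spec_insert_block_under_heading_py text heading content_block out) := by unfold Spec_insert_block_under_heading_py; infer_instance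

-- ===== CLAIM (what is proved, stated in full; the proofs are below) =====
def Claim_equal_insert_block_under_heading_py : Prop := ∀ (text : String) (heading : String) (content_block : String), Dom_insert_block_under_heading_py text heading content_block → Spec_insert_block_under_heading_py text heading content_block (insert_block_under_heading_py text heading content_block)

-- ===== LEMMAS AND PROOFS =====

-- proof-side helpers: a scan-shaped intermediate between A's loop and B's closed form
def pvBSkip (lines : List String) (j : Nat) : Nat :=
  if h : j < lines.length then
    if PySem.Str.strip lines[j] == "" then pvBSkip lines (j + 1) else j
  else j
termination_by lines.length - j

def pvBGo (lines : List String) (heading cb text : String) (i : Nat) : String :=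
  if h : i < lines.length then
    if PySem.Str.strip lines[i] == heading then
      let j := pvBSkip lines (i + 1)
      let new_lines := lines.take j ++ [cb] ++ lines.drop j
      PySem.Str.rstrip (PySem.Str.join "\n" new_lines) ++ "\n"
    else pvBGo lines heading cb text (i + 1)
  else
    PySem.Str.rstrip text ++ "\n\n" ++ heading ++ "\n\n" ++ cb ++ "\n"
termination_by lines.length - i

theorem pvBSkip_ge (lines : List String) (j : Nat) : j ≤ pvBSkip lines j := by
  induction hn : lines.length - j generalizing j with
  | zero =>
      rw [pvBSkip]
      have h : ¬ j < lines.length := by omega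
      simp [h]
  | succ n ih =>
      rw [pvBSkip]
      have h : j < lines.length := by omega
      by_cases hb : PySem.Str.strip lines[j] == ""
      · simp only [dif_pos h, if_pos hb]
        have := ih (j + 1) (by omega)
        omega
      · simp [h, hb]

theorem pvBSkip_le (lines : List String) (j : Nat) (hj : j ≤ lines.length) :
    pvBSkip lines j ≤ lines.length := by
  induction hn : lines.length - j generalizing j with
  | zero =>
      rw [pvBSkip]
      have h : ¬ j < lines.length := by omega
      simp [h]; omega
  | succ n ih =>
      rw [pvBSkip]
      have h : j < lines.length := by omega
      by_cases hb : PySem.Str.strip lines[j] == ""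
      · simp only [dif_pos h, if_pos hb]
        exact ih (j + 1) (by omega) (by omega)
      · simp [h, hb]; omega

-- A's inner loop = the blank-skip scan: it appends lines[ni : pvBSkip ni] and lands at pvBSkip ni
theorem pvAInner_eq (lines : List String) (out : List String) (ni : Nat) :
    pvAInner lines out ni
      = (out ++ (lines.drop ni).take (pvBSkip lines ni - ni), pvBSkip lines ni) := by
  induction hn : lines.length - ni generalizing out ni with
  | zero =>
      rw [pvAInner, pvBSkip]
      have h : ¬ ni < lines.length := by omega
      simp [h]
  | succ n ih =>
      rw [pvAInner, pvBSkip]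
      have h : ni < lines.length := by omega
      by_cases hb : PySem.Str.strip lines[ni] == ""
      · simp only [dif_pos h, if_pos hb]
        rw [ih (out ++ [lines[ni]]) (ni + 1) (by omega)]
        have hge := pvBSkip_ge lines (ni + 1)
        have hdrop : lines.drop ni = lines[ni] :: lines.drop (ni + 1) :=
          List.drop_eq_getElem_cons h
        rw [hdrop]
        have he : pvBSkip lines (ni + 1) - ni = (pvBSkip lines (ni + 1) - (ni + 1)) + 1 := by
          omega
        rw [he, List.take_succ_cons]
        simp
      · simp [h, hb]

-- once inserted, A's loop just copies the remaining lines
theorem pvALoop_inserted (lines : List String) (heading cb : String) (out : List String)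
    (i : Nat) : pvALoop lines heading cb out true i = (out ++ lines.drop i, true) := by
  induction hn : lines.length - i generalizing out i with
  | zero =>
      rw [pvALoop]
      have h : ¬ i < lines.length := by omega
      simp [h, List.drop_eq_nil_of_le (by omega : lines.length ≤ i)]
  | succ n ih =>
      rw [pvALoop]
      have h : i < lines.length := by omega
      simp only [dif_pos h, Bool.not_true, Bool.and_false, Bool.false_eq_true, if_false]
      rw [ih (out ++ [lines[i]]) (i + 1) (by omega)]
      rw [List.drop_eq_getElem_cons h]; simp

-- main invariant for A: from state (out = lines.take i, inserted = false, index = i),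
-- A's finish step produces exactly what the scan from i produces
theorem pvALoop_main (lines : List String) (heading cb text : String) (i : Nat)
    (hi : i ≤ lines.length) :
    (let r := pvALoop lines heading cb (lines.take i) false i;
     if !r.2 then
       PySem.Str.rstrip text ++ "\n\n" ++ heading ++ "\n\n" ++ cb ++ "\n"
     else
       PySem.Str.rstrip (PySem.Str.join "\n" r.1) ++ "\n")
    = pvBGo lines heading cb text i := by
  induction hn : lines.length - i generalizing i with
  | zero =>
      have h : ¬ i < lines.length := by omega
      rw [pvALoop, pvBGo]; simp [h]
  | succ n ih =>
      have h : i < lines.length := by omega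
      rw [pvALoop, pvBGo]
      simp only [dif_pos h, Bool.not_false, Bool.and_true]
      have htake : lines.take i ++ [lines[i]] = lines.take (i + 1) := by
        rw [List.take_add_one]
        simp [h]
      by_cases hm : PySem.Str.strip lines[i] == heading
      · simp only [hm, if_true]
        rw [htake, pvAInner_eq]
        set j := pvBSkip lines (i + 1) with hj
        have hge : i + 1 ≤ j := pvBSkip_ge lines (i + 1)
        have hle : j ≤ lines.length := pvBSkip_le lines (i + 1) (by omega)
        have hjj : (j - 1) + 1 = j := by omega
        rw [hjj, pvALoop_inserted]
        have hsplice : lines.take (i + 1) ++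
            ((lines.drop (i + 1)).take (j - (i + 1)) ++ ([cb] ++ lines.drop j))
            = lines.take j ++ ([cb] ++ lines.drop j) := by
          rw [← List.append_assoc]
          congr 1
          have hjsum : j = (i + 1) + (j - (i + 1)) := by omega
          conv_rhs => rw [hjsum, List.take_add]
        simp only [List.append_assoc]
        rw [hsplice]
        simp
      · have hmf : (PySem.Str.strip lines[i] == heading) = false := by
          simpa using hm
        simp only [hmf, Bool.false_eq_true, if_false]
        rw [htake]
        exact ih (i + 1) (by omega) (by omega)

-- pvBSkip counts exactly the leading blank run
theorem pvBSkip_eq_takeWhile (lines : List String) (j : Nat) :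
    pvBSkip lines j
      = j + ((lines.drop j).takeWhile (fun l => PySem.Str.strip l == "")).length := by
  induction hn : lines.length - j generalizing j with
  | zero =>
      rw [pvBSkip]
      have h : ¬ j < lines.length := by omega
      simp [h, List.drop_eq_nil_of_le (by omega : lines.length ≤ j)]
  | succ n ih =>
      rw [pvBSkip]
      have h : j < lines.length := by omega
      have hdrop : lines.drop j = lines[j] :: lines.drop (j + 1) :=
        List.drop_eq_getElem_cons h
      by_cases hb : PySem.Str.strip lines[j] == ""
      · simp only [dif_pos h, if_pos hb]
        rw [ih (j + 1) (by omega), hdrop]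
        simp only [List.takeWhile_cons, hb, if_true, List.length_cons]
        omega
      · simp only [dif_pos h, if_neg hb]
        rw [hdrop]
        simp [hb]

-- the scan from i = B's closed form applied to the tail stripped.drop i
theorem pvBGo_eq (lines : List String) (heading cb text : String) (i : Nat) :
    pvBGo lines heading cb text i
      = (match PySem.List.index? ((lines.map PySem.Str.strip).drop i) heading with
         | none => PySem.Str.rstrip text ++ "\n\n" ++ heading ++ "\n\n" ++ cb ++ "\n"
         | some k =>
           let blanks := (((lines.map PySem.Str.strip).drop (i + k + 1)).takeWhile
               (fun s => s == "")).length
           let cut := i + k + 1 + blanks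
           PySem.Str.rstrip (PySem.Str.join "\n"
             (lines.take cut ++ [cb] ++ lines.drop cut)) ++ "\n") := by
  induction hn : lines.length - i generalizing i with
  | zero =>
      rw [pvBGo]
      have h : ¬ i < lines.length := by omega
      have hd : (lines.map PySem.Str.strip).drop i = [] :=
        List.drop_eq_nil_of_le (by simpa using (by omega : lines.length ≤ i))
      simp [h, hd, PySem.List.index?]
  | succ n ih =>
      rw [pvBGo]
      have h : i < lines.length := by omega
      have hm : i < (lines.map PySem.Str.strip).length := by simpa using h
      have hd : (lines.map PySem.Str.strip).drop i
          = PySem.Str.strip lines[i] :: (lines.map PySem.Str.strip).drop (i + 1) := by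
        rw [List.drop_eq_getElem_cons hm]; simp
      rw [hd]
      by_cases hb : PySem.Str.strip lines[i] == heading
      · have heq : PySem.Str.strip lines[i] = heading := by simpa using hb
        rw [heq, PySem.List.index?_cons_self]
        simp only [dif_pos h, if_pos hb]
        have hcnt : pvBSkip lines (i + 1)
            = i + 0 + 1 + (((lines.map PySem.Str.strip).drop (i + 0 + 1)).takeWhile
                (fun s => s == "")).length := by
          rw [pvBSkip_eq_takeWhile]
          have hmap : (lines.map PySem.Str.strip).drop (i + 1)
              = (lines.drop (i + 1)).map PySem.Str.strip := by
            simp [List.map_drop]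
          rw [hmap, List.takeWhile_map]
          simp [Function.comp_def]
        rw [hcnt]
      · have hne : PySem.Str.strip lines[i] ≠ heading := by simpa using hb
        rw [PySem.List.index?_cons_of_ne _ hne]
        simp only [dif_pos h, if_neg hb]
        rw [ih (i + 1) (by omega)]
        cases hidx : PySem.List.index? ((lines.map PySem.Str.strip).drop (i + 1)) heading with
        | none => simp
        | some k =>
            simp only [Option.map_some]
            have h1 : i + (k + 1) + 1 = i + 1 + k + 1 := by omega
            simp [h1]

-- ===== VERDICT (by name: the statement is the Claim_ definition above) =====
theorem insert_block_under_heading_py_spec : Claim_equal_insert_block_under_heading_py := by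
  intro text heading content_block _
  unfold Spec_insert_block_under_heading_py insert_block_under_heading_py
    insert_block_under_heading_py_alt
  have hA := pvALoop_main (PySem.Str.splitlines text) heading content_block text 0 (by omega)
  have hB := pvBGo_eq (PySem.Str.splitlines text) heading content_block text 0
  simp only [List.take_zero] at hA
  rw [hA, hB]
  simp only [Nat.zero_add, List.drop_zero]
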